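-- pv_equiv track=rewrite | github.com/hihanifm/awebees | backend/app/middleware/http_logging.py | _mask_sensitive_headers
-- ===== SOURCE A (Python) =====
-- def _mask_sensitive_headers(headers: dict) -> dict:
--     """Mask sensitive data in headers."""
--     masked = headers.copy()
--     sensitive_keys = ["authorization", "cookie", "x-api-key", "api-key"]
--     for key in sensitive_keys:
--         if key.lower() in [k.lower() for k in masked.keys()]:
--             for header_key in list(masked.keys()):
--                 if header_key.lower() == key.lower():
--                     value = masked[header_key]
--                     if key.lower() == "authorization" and value.startswith("Bearer "):
--                         token = value[7:]
--                         if len(token) > 8: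
--                             masked[header_key] = f"Bearer {token[:8]}...{token[-4:]}"
--                         else:
--                             masked[header_key] = "Bearer ***"
--                     else:
--                         masked[header_key] = "***"
--     return masked
-- ===== SOURCE B (Python) =====
-- _SENSITIVE = {"authorization", "cookie", "x-api-key", "api-key"}
--
-- def _masked_value(lower_key, value):
--     if lower_key == "authorization" and value.startswith("Bearer "):
--         token = value[7:]
--         if len(token) > 8:
--             return f"Bearer {token[:8]}...{token[-4:]}"
--         return "Bearer ***"
--     return "***"
--
-- def _mask_sensitive_headers(headers: dict) -> dict:
--     return {
--         k: (_masked_value(k.lower(), v) if k.lower() in _SENSITIVE else v)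
--         for k, v in headers.items()
--     }
-- ===== Notes on version B (the rewrite author's own statement) =====
-- stated objective: simpler
-- what changed: Replaces A's four passes (one per sensitive name, each with a membership pre-scan over all lowered keys plus an inner rescan of every header) by a single dict comprehension over the headers with one set lookup per key.
import Mathlib
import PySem

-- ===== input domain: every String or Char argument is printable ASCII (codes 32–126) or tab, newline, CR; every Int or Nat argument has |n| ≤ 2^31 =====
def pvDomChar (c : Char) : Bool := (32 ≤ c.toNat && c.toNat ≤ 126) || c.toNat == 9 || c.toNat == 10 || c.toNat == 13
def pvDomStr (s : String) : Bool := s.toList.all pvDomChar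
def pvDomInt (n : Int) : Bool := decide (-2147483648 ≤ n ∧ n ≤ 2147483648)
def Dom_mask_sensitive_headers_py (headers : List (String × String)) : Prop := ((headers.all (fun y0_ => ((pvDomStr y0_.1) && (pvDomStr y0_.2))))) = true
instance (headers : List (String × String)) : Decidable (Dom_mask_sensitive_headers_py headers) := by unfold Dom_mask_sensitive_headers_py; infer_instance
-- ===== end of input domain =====

-- B replaces A's four nested rescans by one pass with a set lookup (same results; no speed claim proved).

-- ===== PORT A =====
-- Literal port of A: copy the dict, then for each of the four sensitive names scan the
-- lowered key list and, on membership, rescan every header key and overwrite matches.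
def mask_sensitive_headers_py (headers : List (String × String)) : List (String × String) :=
  let masked := PySem.Dict.ofList headers
  let sensitive_keys : List String := ["authorization", "cookie", "x-api-key", "api-key"]
  (sensitive_keys.foldl (fun (m : PySem.Dict String String) key =>
    if (m.keys.map PySem.Str.lower).contains (PySem.Str.lower key) then
      m.keys.foldl (fun (m2 : PySem.Dict String String) header_key =>
        if PySem.Str.lower header_key == PySem.Str.lower key then
          let value := m2.getD header_key ""
          if PySem.Str.lower key == "authorization" && PySem.Str.startswith value "Bearer " then
            let token := PySem.Str.slice value (some 7) none
            if 8 < PySem.Str.len token then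
              m2.insert header_key (PySem.Str.join "" ["Bearer ", PySem.Str.slice token none (some 8), "...", PySem.Str.slice token (some (-4)) none])
            else
              m2.insert header_key "Bearer ***"
          else
            m2.insert header_key "***"
        else m2) m
    else m) masked).items

-- ===== PORT B =====
def pvSensitive : List String := PySem.Set.ofList ["authorization", "cookie", "x-api-key", "api-key"]

def pvMaskedValue (lower_key : String) (value : String) : String :=
  if lower_key == "authorization" && PySem.Str.startswith value "Bearer " then
    let token := PySem.Str.slice value (some 7) none
    if 8 < PySem.Str.len token then
      PySem.Str.join "" ["Bearer ", PySem.Str.slice token none (some 8), "...", PySem.Str.slice token (some (-4)) none]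
    else "Bearer ***"
  else "***"

-- Literal port of B: one dict comprehension over the headers, one set lookup per key.
def mask_sensitive_headers_py_alt (headers : List (String × String)) : List (String × String) :=
  (PySem.Dict.ofList headers).items.map (fun p =>
    (p.1, if PySem.Set.contains pvSensitive (PySem.Str.lower p.1) then pvMaskedValue (PySem.Str.lower p.1) p.2 else p.2))

-- ===== PRECONDITION & SPEC =====
def Spec_mask_sensitive_headers_py (headers : List (String × String)) (out : List (String × String)) : Prop := out = mask_sensitive_headers_py_alt headers
instance (headers : List (String × String)) (out : List (String × String)) : Decidable (Spec_mask_sensitive_headers_py headers out) := by unfold Spec_mask_sensitive_headers_py; infer_instance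

-- ===== CLAIM (what is proved, stated in full; the proofs are below) =====
def Claim_equal_mask_sensitive_headers_py : Prop := ∀ (headers : List (String × String)), Dom_mask_sensitive_headers_py headers → Spec_mask_sensitive_headers_py headers (mask_sensitive_headers_py headers)

-- ===== LEMMAS AND PROOFS =====


-- proof-side names for the two loop bodies of port A
def pvStep (key : String) (m2 : PySem.Dict String String) (header_key : String) : PySem.Dict String String :=
  if PySem.Str.lower header_key == PySem.Str.lower key then
    let value := m2.getD header_key ""
    if PySem.Str.lower key == "authorization" && PySem.Str.startswith value "Bearer " then
      let token := PySem.Str.slice value (some 7) none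
      if 8 < PySem.Str.len token then
        m2.insert header_key (PySem.Str.join "" ["Bearer ", PySem.Str.slice token none (some 8), "...", PySem.Str.slice token (some (-4)) none])
      else
        m2.insert header_key "Bearer ***"
    else
      m2.insert header_key "***"
  else m2

def pvOStep (m : PySem.Dict String String) (key : String) : PySem.Dict String String :=
  if (m.keys.map PySem.Str.lower).contains (PySem.Str.lower key) then
    m.keys.foldl (pvStep key) m
  else m

lemma pvA_eq (headers : List (String × String)) :
    mask_sensitive_headers_py headers
      = ((["authorization", "cookie", "x-api-key", "api-key"] : List String).foldl pvOStep
          (PySem.Dict.ofList headers)).items := rfl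

lemma pvStep_eq (key : String) (m2 : PySem.Dict String String) (k : String) :
    pvStep key m2 k =
      if PySem.Str.lower k = PySem.Str.lower key then
        m2.insert k (pvMaskedValue (PySem.Str.lower key) (m2.getD k ""))
      else m2 := by
  simp only [pvStep, pvMaskedValue, beq_iff_eq]
  split_ifs <;> rfl

lemma pvInner_fold (key : String) (ks : List String) (m : PySem.Dict String String)
    (hnd : ks.Nodup) (hc : ∀ k ∈ ks, m.contains k = true) :
    (ks.foldl (pvStep key) m).keys = m.keys ∧
      ∀ j, (ks.foldl (pvStep key) m).getD j "" =
        if j ∈ ks ∧ PySem.Str.lower j = PySem.Str.lower key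
        then pvMaskedValue (PySem.Str.lower key) (m.getD j "") else m.getD j "" := by
  induction ks generalizing m with
  | nil => simp
  | cons k ks ih =>
    have hk : m.contains k = true := hc k (by simp)
    rcases List.nodup_cons.mp hnd with ⟨hknot, hnd'⟩
    by_cases hmatch : PySem.Str.lower k = PySem.Str.lower key
    · have hstep : pvStep key m k = m.insert k (pvMaskedValue (PySem.Str.lower key) (m.getD k "")) := by
        rw [pvStep_eq]; simp [hmatch]
      have hkeys' : (m.insert k (pvMaskedValue (PySem.Str.lower key) (m.getD k ""))).keys = m.keys :=
        PySem.Dict.keys_insert_of_contains _ _ hk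
      have hc' : ∀ x ∈ ks, (m.insert k (pvMaskedValue (PySem.Str.lower key) (m.getD k ""))).contains x = true := by
        intro x hx
        rw [PySem.Dict.contains_iff_mem_keys, hkeys', ← PySem.Dict.contains_iff_mem_keys]
        exact hc x (by simp [hx])
      obtain ⟨ihk, ihg⟩ := ih _ hnd' hc'
      constructor
      · simp only [List.foldl_cons, hstep]; rw [ihk, hkeys']
      · intro j
        simp only [List.foldl_cons, hstep]
        rw [ihg j]
        by_cases hj : j ∈ ks
        · have hjk : j ≠ k := fun h => hknot (h ▸ hj)
          rw [PySem.Dict.getD_insert]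
          simp [hj, hjk]
        · rw [PySem.Dict.getD_insert]
          by_cases hjk : j = k
          · subst hjk; simp [hj, hmatch]
          · simp [hj, hjk]
    · have hstep : pvStep key m k = m := by rw [pvStep_eq]; simp [hmatch]
      have hc' : ∀ x ∈ ks, m.contains x = true := fun x hx => hc x (by simp [hx])
      obtain ⟨ihk, ihg⟩ := ih _ hnd' hc'
      constructor
      · simp only [List.foldl_cons, hstep]; exact ihk
      · intro j
        simp only [List.foldl_cons, hstep]
        rw [ihg j]
        by_cases hjk : j = k
        · subst hjk; simp [hmatch]
        · simp [hjk]

lemma pvOStep_spec (key : String) (m : PySem.Dict String String) (hnd : m.keys.Nodup) :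
    (pvOStep m key).keys = m.keys ∧
      ∀ j, (pvOStep m key).getD j "" =
        if j ∈ m.keys ∧ PySem.Str.lower j = PySem.Str.lower key
        then pvMaskedValue (PySem.Str.lower key) (m.getD j "") else m.getD j "" := by
  by_cases hg : (m.keys.map PySem.Str.lower).contains (PySem.Str.lower key) = true
  · have h := pvInner_fold key m.keys m hnd
      (fun k hk => (PySem.Dict.contains_iff_mem_keys m k).mpr hk)
    simpa only [pvOStep, hg, if_true] using h
  · have hg' : (m.keys.map PySem.Str.lower).contains (PySem.Str.lower key) = false := by
      simpa using hg
    have hnone : ∀ j, ¬ (j ∈ m.keys ∧ PySem.Str.lower j = PySem.Str.lower key) := by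
      rintro j ⟨hj, hl⟩
      have hmem : PySem.Str.lower key ∈ m.keys.map PySem.Str.lower :=
        hl ▸ List.mem_map_of_mem hj
      exact hg (by simpa using hmem)
    constructor
    · simp only [pvOStep, hg', Bool.false_eq_true, if_false]
    · intro j
      simp only [pvOStep, hg', Bool.false_eq_true, if_false, hnone j, if_false]

set_option maxHeartbeats 1000000 in
lemma pvChain_spec (d : PySem.Dict String String) (hnd : d.keys.Nodup) :
    let r := (["authorization", "cookie", "x-api-key", "api-key"] : List String).foldl pvOStep d
    r.keys = d.keys ∧
      ∀ j ∈ d.keys, r.getD j "" =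
        if PySem.Set.contains pvSensitive (PySem.Str.lower j)
        then pvMaskedValue (PySem.Str.lower j) (d.getD j "") else d.getD j "" := by
  intro r
  obtain ⟨k1, g1⟩ := pvOStep_spec "authorization" d hnd
  obtain ⟨k2, g2⟩ := pvOStep_spec "cookie" (pvOStep d "authorization") (k1 ▸ hnd)
  obtain ⟨k3, g3⟩ := pvOStep_spec "x-api-key" (pvOStep (pvOStep d "authorization") "cookie") (k2 ▸ k1 ▸ hnd)
  obtain ⟨k4, g4⟩ := pvOStep_spec "api-key"
    (pvOStep (pvOStep (pvOStep d "authorization") "cookie") "x-api-key") (k3 ▸ k2 ▸ k1 ▸ hnd)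
  have hr : r = pvOStep (pvOStep (pvOStep (pvOStep d "authorization") "cookie") "x-api-key") "api-key" := rfl
  have hkeys : r.keys = d.keys := by rw [hr, k4, k3, k2, k1]
  refine ⟨hkeys, ?_⟩
  intro j hj
  have hla : PySem.Str.lower "authorization" = "authorization" := by decide
  have hlc : PySem.Str.lower "cookie" = "cookie" := by decide
  have hlx : PySem.Str.lower "x-api-key" = "x-api-key" := by decide
  have hlk : PySem.Str.lower "api-key" = "api-key" := by decide
  rw [hr, g4 j, g3 j, g2 j, g1 j, hla, hlc, hlx, hlk, k3, k2, k1]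
  have hS : pvSensitive = ["authorization", "cookie", "x-api-key", "api-key"] := by decide
  by_cases h1 : PySem.Str.lower j = "authorization"
  · simp [hj, h1, hS]
  · by_cases h2 : PySem.Str.lower j = "cookie"
    · simp [hj, h2, hS]
    · by_cases h3 : PySem.Str.lower j = "x-api-key"
      · simp [hj, h3, hS]
      · by_cases h4 : PySem.Str.lower j = "api-key"
        · simp [hj, h4, hS]
        · simp [h1, h2, h3, h4, hS]

-- ===== VERDICT (by name: the statement is the Claim_ definition above) =====
set_option maxHeartbeats 1000000 in
theorem mask_sensitive_headers_py_spec : Claim_equal_mask_sensitive_headers_py := by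
  intro headers _
  show mask_sensitive_headers_py headers = mask_sensitive_headers_py_alt headers
  have hnd : (PySem.Dict.ofList headers).keys.Nodup := PySem.Dict.nodup_keys_ofList headers
  obtain ⟨hkeys, hg⟩ := pvChain_spec (PySem.Dict.ofList headers) hnd
  rw [pvA_eq, mask_sensitive_headers_py_alt]
  rw [PySem.Dict.items_eq_map_keys _ (hkeys ▸ hnd) "", hkeys]
  rw [PySem.Dict.items_eq_map_keys (PySem.Dict.ofList headers) hnd "", List.map_map]
  refine List.map_congr_left ?_
  intro j hj
  simp only [Function.comp]
  rw [hg j hj]
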